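-- pv_equiv track=rewrite | github.com/ANITS60106/BAP_classworks | 1444A.py | xyi
-- ===== SOURCE A (Python) =====
-- def factorize(n):
--     factors = {}
--     while n % 2 == 0:
--         factors[2] = factors.get(2, 0) + 1
--         n //= 2
--     i = 3
--     while i * i <= n:
--         while n % i == 0:
--             factors[i] = factors.get(i, 0) + 1
--             n //= i
--         i += 2
--     if n > 1:
--         factors[n] = 1
--     return factors
--
-- def xyi(p, q):
--     if p % q != 0:
--         return p
--     q_factors = factorize(q)
--     x = 1
--     for prime in q_factors:
--         temp = p
--         while temp % q == 0:
--             temp //= prime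
--         if temp % q != 0:
--             x = max(x, temp)
--     return x
-- ===== SOURCE B (Python) =====
-- def _vp(n, d):
--     # exponent of d in n
--     e = 0
--     while n % d == 0:
--         n //= d
--         e += 1
--     return e
--
-- def _cand(p, prime, b):
--     # largest divisor of p carrying fewer than b factors of prime: p // prime**(vp-b+1)
--     return p // prime ** (_vp(p, prime) - b + 1)
--
-- def xyi(p, q):
--     # Largest divisor of p not divisible by q, by direct trial division of q:
--     # for each prime power prime**b of q take p // prime**(vp(p,prime)-b+1).
--     if p % q != 0:
--         return p
--     best = 1
--     n = q
--     e2 = _vp(n, 2)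
--     if e2:
--         n //= 2 ** e2
--         best = max(best, _cand(p, 2, e2))
--     d = 3
--     while d * d <= n:
--         e = _vp(n, d)
--         if e:
--             n //= d ** e
--             best = max(best, _cand(p, d, e))
--         d += 2
--     if n > 1:
--         best = max(best, _cand(p, n, 1))
--     return best
-- ===== Notes on version B (the rewrite author's own statement) =====
-- stated objective: alternative
-- what changed: B drops A's factorize dict entirely: it trial-divides q in one pass and, for each prime power prime**b found, forms the candidate p // prime**(vp(p,prime)-b+1) by valuation arithmetic, replacing A's per-prime `while temp % q == 0` divide-loop and dict construction with direct exact-power division.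
import Mathlib
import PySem

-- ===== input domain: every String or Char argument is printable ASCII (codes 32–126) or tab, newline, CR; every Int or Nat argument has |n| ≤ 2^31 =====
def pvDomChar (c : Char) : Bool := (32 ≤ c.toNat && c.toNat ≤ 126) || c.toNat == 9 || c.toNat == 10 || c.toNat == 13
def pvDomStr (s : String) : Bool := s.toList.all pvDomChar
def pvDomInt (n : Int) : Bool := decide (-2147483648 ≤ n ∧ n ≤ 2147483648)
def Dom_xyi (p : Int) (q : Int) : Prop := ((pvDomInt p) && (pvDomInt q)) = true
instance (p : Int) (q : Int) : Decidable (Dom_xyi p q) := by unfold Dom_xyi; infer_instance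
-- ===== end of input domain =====

-- B replaces A's dict-building factorize and per-prime `while temp % q == 0` loop by a single
-- trial-division pass over q computing each candidate as p // prime**(vp(p,prime)-b+1); alternative decomposition, same exact values.


-- ===== PORT A =====
-- factorize: A's helper. Python `while` loops become fuel recursion; the fuel (natAbs-based)
-- is proved sufficient on every input where the Python loop terminates.
def factorizeTwoLoop : Nat → Int → PySem.Dict Int Int → Int × PySem.Dict Int Int
  | 0, n, factors => (n, factors)
  | fuel+1, n, factors =>
    if PySem.Int.mod n 2 = 0 then
      factorizeTwoLoop fuel (PySem.Int.floordiv n 2) (factors.insert 2 (factors.getD 2 0 + 1))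
    else (n, factors)

def factorizeInner : Nat → Int → Int → PySem.Dict Int Int → Int × PySem.Dict Int Int
  | 0, _, n, factors => (n, factors)
  | fuel+1, i, n, factors =>
    if PySem.Int.mod n i = 0 then
      factorizeInner fuel i (PySem.Int.floordiv n i) (factors.insert i (factors.getD i 0 + 1))
    else (n, factors)

def factorizeOuter : Nat → Int → Int → PySem.Dict Int Int → Int × PySem.Dict Int Int
  | 0, _, n, factors => (n, factors)
  | fuel+1, i, n, factors =>
    if i * i ≤ n then
      let r := factorizeInner (n.natAbs + 1) i n factors
      factorizeOuter fuel (i + 2) r.1 r.2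
    else (n, factors)

def factorize (n : Int) : PySem.Dict Int Int :=
  let r2 := factorizeTwoLoop (n.natAbs + 1) n PySem.Dict.empty
  let r3 := factorizeOuter (r2.1.natAbs + 3) 3 r2.1 r2.2
  if r3.1 > 1 then r3.2.insert r3.1 1 else r3.2

-- `while temp % q == 0: temp //= prime`
def xyiTempLoop : Nat → Int → Int → Int → Int
  | 0, _, _, temp => temp
  | fuel+1, q, prime, temp =>
    if PySem.Int.mod temp q = 0 then xyiTempLoop fuel q prime (PySem.Int.floordiv temp prime)
    else temp

def xyi (p : Int) (q : Int) : Int :=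
  if PySem.Int.mod p q ≠ 0 then p
  else
    (factorize q).keys.foldl (fun x prime =>
      let temp := xyiTempLoop (p.natAbs + 1) q prime p
      if PySem.Int.mod temp q ≠ 0 then max x temp else x) 1

-- ===== PORT B =====
-- _vp: `e = 0; while n % d == 0: n //= d; e += 1; return e`
def vp : Nat → Int → Int → Nat
  | 0, _, _ => 0
  | fuel+1, n, d =>
    if PySem.Int.mod n d = 0 then vp fuel (PySem.Int.floordiv n d) d + 1 else 0

-- _cand: `p // prime ** (_vp(p, prime) - b + 1)`. On every executed call q | p forces
-- _vp(p, prime) ≥ b, so Python's exponent is ≥ 1 and the Int-subtraction `.toNat` is exact there.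
def cand (p : Int) (prime : Int) (b : Int) : Int :=
  PySem.Int.floordiv p (prime ^ (((vp (p.natAbs + 1) p prime : Int) - b + 1).toNat))

-- B's `while d * d <= n` loop, threading (n, best); returns both since `n` is read after the loop
def xyiAltLoop : Nat → Int → Int → Int → Int → Int × Int
  | 0, _, _, n, best => (n, best)
  | fuel+1, p, d, n, best =>
    if d * d ≤ n then
      let e := vp (n.natAbs + 1) n d
      if e ≠ 0 then
        xyiAltLoop fuel p (d + 2) (PySem.Int.floordiv n (d ^ e)) (max best (cand p d (e : Int)))
      else xyiAltLoop fuel p (d + 2) n best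
    else (n, best)

def xyi_alt (p : Int) (q : Int) : Int :=
  if PySem.Int.mod p q ≠ 0 then p
  else
    let e2 := vp (q.natAbs + 1) q 2
    let n0 := if e2 ≠ 0 then PySem.Int.floordiv q (2 ^ e2) else q
    let b0 := if e2 ≠ 0 then max 1 (cand p 2 (e2 : Int)) else 1
    let r := xyiAltLoop (n0.natAbs + 3) p 3 n0 b0
    if r.1 > 1 then max r.2 (cand p r.1 1) else r.2

-- ===== PRECONDITION & SPEC =====
-- Pre_ is exactly A's halting set: q = 0 raises ZeroDivisionError, and for p = 0 with
-- |q| ≥ 2 A's `while temp % q == 0` loop never terminates (B hangs there too).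
def Pre_xyi (p : Int) (q : Int) : Prop := q ≠ 0 ∧ (p ≠ 0 ∨ q = 1 ∨ q = -1)
instance (p : Int) (q : Int) : Decidable (Pre_xyi p q) := by unfold Pre_xyi; infer_instance
def pvWitness_xyi : Int × Int := (12, 6)

def Spec_xyi (p : Int) (q : Int) (out : Int) : Prop := out = xyi_alt p q
instance (p : Int) (q : Int) (out : Int) : Decidable (Spec_xyi p q out) := by unfold Spec_xyi; infer_instance

-- ===== CLAIM (what is proved, stated in full; the proofs are below) =====
def Claim_equal_xyi : Prop := ∀ (p : Int) (q : Int), Dom_xyi p q → Pre_xyi p q → Spec_xyi p q (xyi p q)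

-- ===== LEMMAS AND PROOFS =====

-- An item (π, b) of factorize q is sound: π is a positive prime and b its exact multiplicity in q.
def ItemSound (q : Int) (pr : Int × Int) : Prop :=
  2 ≤ pr.1 ∧ Prime pr.1 ∧ 1 ≤ pr.2 ∧ pr.1 ^ pr.2.toNat ∣ q ∧ ¬ pr.1 ^ (pr.2.toNat + 1) ∣ q

-- exact decomposition of a nonzero integer by a base ≥ 2
lemma exists_pow_mul_not_dvd_aux (π : Int) (hπ : 2 ≤ π) : ∀ (N : Nat) (p : Int),
    p.natAbs ≤ N → p ≠ 0 → ∃ (a : Nat) (m : Int), p = π ^ a * m ∧ ¬ π ∣ m := by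
  intro N
  induction N with
  | zero => intro p hN hp; exact absurd (Int.natAbs_eq_zero.1 (by omega)) hp
  | succ N ih =>
    intro p hN hp
    by_cases hdvd : π ∣ p
    · obtain ⟨t, rfl⟩ := hdvd
      have ht : t ≠ 0 := by rintro rfl; simp at hp
      have htN : t.natAbs ≤ N := by
        have h1 : (π * t).natAbs = π.natAbs * t.natAbs := Int.natAbs_mul π t
        have h2 : 1 ≤ t.natAbs := by
          rcases Nat.eq_zero_or_pos t.natAbs with h | h
          · exact absurd (Int.natAbs_eq_zero.1 h) ht
          · omega
        have h3 : 2 ≤ π.natAbs := by omega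
        nlinarith
      obtain ⟨a, m, hm, hnd⟩ := ih t htN ht
      exact ⟨a + 1, m, by rw [hm]; ring, hnd⟩
    · exact ⟨0, p, by simp, hdvd⟩

lemma exists_pow_mul_not_dvd (π : Int) (hπ : 2 ≤ π) : ∀ (p : Int), p ≠ 0 →
    ∃ (a : Nat) (m : Int), p = π ^ a * m ∧ ¬ π ∣ m := fun p hp =>
  exists_pow_mul_not_dvd_aux π hπ p.natAbs p le_rfl hp

-- multiplicity bound, for fuel sufficiency
lemma pow_le_natAbs {π p : Int} {a : Nat} (hπ : 2 ≤ π) (hp : p ≠ 0) (h : π ^ a ∣ p) :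
    a < p.natAbs + 1 := by
  have h1 : (π ^ a).natAbs ≤ p.natAbs := Int.natAbs_le_of_dvd_ne_zero h hp
  have h2 : (π ^ a).natAbs = π.natAbs ^ a := by simp [Int.natAbs_pow]
  have h3 : 2 ^ a ≤ π.natAbs ^ a := Nat.pow_le_pow_left (by omega) a
  have h4 : a < 2 ^ a := Nat.lt_two_pow_self
  omega

-- exact floor division by a positive divisor
lemma floordiv_mul_cancel (π m : Int) (hπ : 0 < π) :
    PySem.Int.floordiv (π * m) π = m := by
  rw [PySem.Int.floordiv_eq_ediv_of_pos hπ, Int.mul_ediv_cancel_left _ (by omega)]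

-- characterisation: with π^b ∥ q, π ∤ m and q ∣ π^a * m, q divides π^c * m iff b ≤ c
lemma dvd_char {q π m : Int} {a b : Nat}
    (hπ : Prime π) (hm : ¬ π ∣ m)
    (hb : π ^ b ∣ q) (hb' : ¬ π ^ (b + 1) ∣ q) (hqp : q ∣ π ^ a * m) :
    ∀ c : Nat, (q ∣ π ^ c * m ↔ b ≤ c) := by
  obtain ⟨q', hq'⟩ := hb
  have hπq' : ¬ π ∣ q' := by
    intro ⟨t, ht⟩
    exact hb' ⟨t, by rw [hq', ht]; ring⟩
  have hcop : IsCoprime π q' := hπ.coprime_iff_not_dvd.2 hπq'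
  have hq'm : q' ∣ m := by
    have h1 : q' ∣ π ^ a * m := dvd_trans ⟨π ^ b, by rw [hq']; ring⟩ hqp
    exact (hcop.symm.pow_right (n := a)).dvd_of_dvd_mul_right (by rwa [mul_comm] at h1)
  intro c
  constructor
  · intro hdvd
    have h1 : π ^ b ∣ π ^ c * m := dvd_trans ⟨q', hq'⟩ hdvd
    have h2 : IsCoprime (π ^ b) m := (hπ.coprime_iff_not_dvd.2 hm).pow_left
    have h3 : π ^ b ∣ π ^ c := h2.dvd_of_dvd_mul_right h1
    exact (pow_dvd_pow_iff hπ.ne_zero hπ.not_unit).1 h3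
  · intro hbc
    rw [hq']
    exact mul_dvd_mul (pow_dvd_pow π hbc) hq'm

-- A's inner loop: starting from π^(e+k) * m it strips k factors of π and stops at π^e * m
lemma xyiTempLoop_spec {q π m : Int} {e : Nat}
    (char : ∀ c : Nat, (q ∣ π ^ c * m ↔ e + 1 ≤ c)) (hπpos : 0 < π) :
    ∀ (k fuel : Nat), k < fuel → xyiTempLoop fuel q π (π ^ (e + k) * m) = π ^ e * m := by
  intro k
  induction k with
  | zero =>
    intro fuel hf
    obtain ⟨f, rfl⟩ := Nat.exists_eq_succ_of_ne_zero (Nat.pos_iff_ne_zero.1 hf)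
    simp only [xyiTempLoop]
    rw [if_neg]
    · simp
    · rw [PySem.Int.mod_eq_zero_iff_dvd]
      simp only [Nat.add_zero]
      rw [char e]
      omega
  | succ k ih =>
    intro fuel hf
    obtain ⟨f, rfl⟩ := Nat.exists_eq_succ_of_ne_zero (by omega : fuel ≠ 0)
    simp only [xyiTempLoop]
    rw [if_pos]
    · have hstep : PySem.Int.floordiv (π ^ (e + (k + 1)) * m) π = π ^ (e + k) * m := by
        rw [show π ^ (e + (k + 1)) * m = π * (π ^ (e + k) * m) by ring]
        exact floordiv_mul_cancel _ _ hπpos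
      rw [hstep]
      exact ih f (by omega)
    · rw [PySem.Int.mod_eq_zero_iff_dvd, char]
      omega

-- B's valuation loop: counts all factors of π
lemma vp_spec {π m : Int} (hπpos : 0 < π) (hm : ¬ π ∣ m) :
    ∀ (a fuel : Nat), a < fuel → vp fuel (π ^ a * m) π = a := by
  intro a
  induction a with
  | zero =>
    intro fuel hf
    obtain ⟨f, rfl⟩ := Nat.exists_eq_succ_of_ne_zero (by omega : fuel ≠ 0)
    simp only [vp]
    rw [if_neg]
    rw [PySem.Int.mod_eq_zero_iff_dvd]
    simpa using hm
  | succ a ih =>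
    intro fuel hf
    obtain ⟨f, rfl⟩ := Nat.exists_eq_succ_of_ne_zero (by omega : fuel ≠ 0)
    simp only [vp]
    rw [if_pos]
    · have hstep : PySem.Int.floordiv (π ^ (a + 1) * m) π = π ^ a * m := by
        rw [show π ^ (a + 1) * m = π * (π ^ a * m) by ring]
        exact floordiv_mul_cancel _ _ hπpos
      rw [hstep, ih f (by omega)]
    · rw [PySem.Int.mod_eq_zero_iff_dvd]
      exact ⟨π ^ a * m, by ring⟩

-- B's candidate for a prime power π^b exactly dividing some divisor of p:
-- with p = π^a * m, π ∤ m and 1 ≤ b ≤ a it equals π^(b-1) * m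
lemma cand_eq {π m p : Int} {a : Nat} {b : Int}
    (hπ : 2 ≤ π) (hp_eq : p = π ^ a * m) (hm : ¬ π ∣ m) (hp : p ≠ 0)
    (hb1 : 1 ≤ b) (hba : b ≤ (a : Int)) :
    cand p π b = π ^ (b - 1).toNat * m := by
  have hfa : a < p.natAbs + 1 := pow_le_natAbs hπ hp (hp_eq ▸ ⟨m, rfl⟩)
  have hvp : vp (p.natAbs + 1) p π = a := by
    rw [hp_eq]; exact vp_spec (by omega) hm a _ (by omega)
  unfold cand
  rw [hvp]
  have hk : ((a : Int) - b + 1).toNat = a - (b - 1).toNat := by omega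
  rw [hk, hp_eq]
  have hsplit : π ^ a * m = π ^ (a - (b - 1).toNat) * (π ^ (b - 1).toNat * m) := by
    rw [← mul_assoc, ← pow_add]
    congr 2
    omega
  rw [hsplit]
  exact floordiv_mul_cancel _ _ (pow_pos (by omega) _)

-- the dict effect of c iterations of `factors[k] = factors.get(k, 0) + 1`
def pvBump (k : Int) : Nat → PySem.Dict Int Int → PySem.Dict Int Int
  | 0, d => d
  | c+1, d => pvBump k c (d.insert k (d.getD k 0 + 1))

lemma pvBump_last (k : Int) : ∀ (c : Nat) (d : PySem.Dict Int Int) (l : List (Int × Int)) (j : Int),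
    d.items = l ++ [(k, j)] → d.keys.Nodup →
    (pvBump k c d).items = l ++ [(k, j + c)] ∧ (pvBump k c d).keys = d.keys := by
  intro c
  induction c with
  | zero => intro d l j hd _; simpa [pvBump] using hd
  | succ c ih =>
    intro d l j hd hnodup
    have hmem : (k, j) ∈ d.items := by rw [hd]; simp
    have hget : d.getD k 0 = j := PySem.Dict.getD_of_mem_items d hmem hnodup 0
    have hcont : d.contains k = true :=
      (PySem.Dict.contains_iff_mem_keys d k).2 (PySem.Dict.mem_keys_of_mem_items d hmem)
    have hknotl : ∀ p ∈ l, p.1 ≠ k := by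
      intro p hp hpk
      have hkeys : d.keys = (l.map Prod.fst) ++ [k] := by
        show d.items.map Prod.fst = _
        rw [hd]; simp
      rw [hkeys] at hnodup
      exact (List.disjoint_of_nodup_append hnodup) (List.mem_map_of_mem hp) (by simp [hpk])
    have hitems' : (d.insert k (d.getD k 0 + 1)).items = l ++ [(k, j + 1)] := by
      rw [PySem.Dict.items_insert_of_contains d _ hcont, hd, hget]
      rw [List.map_append]
      congr 1
      · conv_rhs => rw [show l = l.map id from (List.map_id l).symm]
        exact List.map_congr_left (fun p hp => by simp [hknotl p hp])
      · simp
    have hkeys' : (d.insert k (d.getD k 0 + 1)).keys = d.keys :=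
      PySem.Dict.keys_insert_of_contains d _ hcont
    have hnodup' : (d.insert k (d.getD k 0 + 1)).keys.Nodup := by rw [hkeys']; exact hnodup
    obtain ⟨h1, h2⟩ := ih (d.insert k (d.getD k 0 + 1)) l (j + 1) hitems' hnodup'
    refine ⟨?_, by rw [pvBump, h2, hkeys']⟩
    rw [pvBump, h1]
    congr 3
    push_cast
    ring

lemma pvBump_fresh (k : Int) (c : Nat) (hc : 1 ≤ c) (d : PySem.Dict Int Int)
    (hk : d.contains k = false) (hnodup : d.keys.Nodup) :
    (pvBump k c d).items = d.items ++ [(k, (c : Int))] ∧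
    (pvBump k c d).keys = d.keys ++ [k] := by
  obtain ⟨c', rfl⟩ := Nat.exists_eq_succ_of_ne_zero (by omega : c ≠ 0)
  have hget : d.getD k 0 = 0 := PySem.Dict.getD_of_not_contains d 0 hk
  have hitems' : (d.insert k (d.getD k 0 + 1)).items = d.items ++ [(k, 1)] := by
    rw [PySem.Dict.items_insert_of_not_contains d _ hk, hget]; norm_num
  have hkeys' : (d.insert k (d.getD k 0 + 1)).keys = d.keys ++ [k] :=
    PySem.Dict.keys_insert_of_not_contains d _ hk
  have hkmem : k ∉ d.keys := fun hmem => by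
    rw [(PySem.Dict.contains_iff_mem_keys d k).2 hmem] at hk; cases hk
  have hnodup' : (d.insert k (d.getD k 0 + 1)).keys.Nodup := by
    rw [hkeys']
    exact List.Nodup.append hnodup (List.nodup_singleton k) (by simpa using hkmem)
  obtain ⟨h1, h2⟩ := pvBump_last k c' (d.insert k (d.getD k 0 + 1)) d.items 1 hitems' hnodup'
  refine ⟨?_, by rw [pvBump, h2, hkeys']⟩
  rw [pvBump, h1]
  congr 3
  push_cast
  ring

-- the 2-stripping loop of factorize
lemma factorizeTwoLoop_spec {m : Int} (hm : ¬ (2:Int) ∣ m) :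
    ∀ (c fuel : Nat), c < fuel → ∀ d,
      factorizeTwoLoop fuel ((2:Int) ^ c * m) d = (m, pvBump 2 c d) := by
  intro c
  induction c with
  | zero =>
    intro fuel hf d
    obtain ⟨f, rfl⟩ := Nat.exists_eq_succ_of_ne_zero (by omega : fuel ≠ 0)
    simp only [factorizeTwoLoop, pvBump]
    rw [if_neg]
    · simp
    · rw [PySem.Int.mod_eq_zero_iff_dvd]
      simpa using hm
  | succ c ih =>
    intro fuel hf d
    obtain ⟨f, rfl⟩ := Nat.exists_eq_succ_of_ne_zero (by omega : fuel ≠ 0)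
    simp only [factorizeTwoLoop, pvBump]
    rw [if_pos]
    · rw [show (2:Int) ^ (c + 1) * m = 2 * ((2:Int) ^ c * m) by ring,
         floordiv_mul_cancel _ _ (by norm_num)]
      exact ih f (by omega) _
    · rw [PySem.Int.mod_eq_zero_iff_dvd]
      exact ⟨(2:Int) ^ c * m, by ring⟩

-- the i-stripping inner loop of factorize
lemma factorizeInner_spec {i m : Int} (hi : 0 < i) (hm : ¬ i ∣ m) :
    ∀ (c fuel : Nat), c < fuel → ∀ d,
      factorizeInner fuel i (i ^ c * m) d = (m, pvBump i c d) := by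
  intro c
  induction c with
  | zero =>
    intro fuel hf d
    obtain ⟨f, rfl⟩ := Nat.exists_eq_succ_of_ne_zero (by omega : fuel ≠ 0)
    simp only [factorizeInner, pvBump]
    rw [if_neg]
    · simp
    · rw [PySem.Int.mod_eq_zero_iff_dvd]
      simpa using hm
  | succ c ih =>
    intro fuel hf d
    obtain ⟨f, rfl⟩ := Nat.exists_eq_succ_of_ne_zero (by omega : fuel ≠ 0)
    simp only [factorizeInner, pvBump]
    rw [if_pos]
    · rw [show i ^ (c + 1) * m = i * (i ^ c * m) by ring,
         floordiv_mul_cancel _ _ hi]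
      exact ih f (by omega) _
    · rw [PySem.Int.mod_eq_zero_iff_dvd]
      exact ⟨i ^ c * m, by ring⟩

-- an i ≥ 2 dividing n is prime once all positive prime divisors of n are ≥ i
lemma prime_of_min_divisor {i n : Int} (h2 : 2 ≤ i) (hdvd : i ∣ n)
    (hmin : ∀ r : Int, 0 < r → Prime r → r ∣ n → i ≤ r) : Prime i := by
  have hi1 : i.natAbs ≠ 1 := by omega
  have hf : i.natAbs.minFac.Prime := Nat.minFac_prime hi1
  have hfd : (i.natAbs.minFac : Int) ∣ i := by
    have h1 : (i.natAbs.minFac : Int) ∣ (i.natAbs : Int) := Int.natCast_dvd_natCast.2 (Nat.minFac_dvd _)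
    rwa [Int.natAbs_of_nonneg (by omega)] at h1
  have hle : i ≤ (i.natAbs.minFac : Int) :=
    hmin _ (by exact_mod_cast hf.pos) (Nat.prime_iff_prime_int.mp hf) (hfd.trans hdvd)
  have hge : (i.natAbs.minFac : Int) ≤ i := by
    have := Nat.minFac_le (n := i.natAbs) (by omega)
    omega
  have : (i.natAbs.minFac : Int) = i := le_antisymm hge hle
  rw [Int.prime_iff_natAbs_prime]
  have : i.natAbs.minFac = i.natAbs := by omega
  rwa [← this]

-- a leftover n2 with n2 < i'² whose positive prime divisors are all ≥ i' is prime
lemma prime_of_small {i' n2 : Int} (h1 : 1 < n2) (hsq : n2 < i' * i') (hi : 0 < i')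
    (hmin : ∀ r : Int, 0 < r → Prime r → r ∣ n2 → i' ≤ r) : Prime n2 := by
  have hn1 : n2.natAbs ≠ 1 := by omega
  have hf : n2.natAbs.minFac.Prime := Nat.minFac_prime hn1
  have hfd : (n2.natAbs.minFac : Int) ∣ n2 := by
    have h0 : (n2.natAbs.minFac : Int) ∣ (n2.natAbs : Int) := Int.natCast_dvd_natCast.2 (Nat.minFac_dvd _)
    rwa [Int.natAbs_of_nonneg (by omega)] at h0
  set f : Int := (n2.natAbs.minFac : Int) with hfdef
  have hfle : i' ≤ f := hmin _ (by rw [hfdef]; exact_mod_cast hf.pos) (Nat.prime_iff_prime_int.mp hf) hfd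
  obtain ⟨t, ht⟩ := hfd
  have hfpos : 0 < f := by rw [hfdef]; exact_mod_cast hf.pos
  have htpos : 0 < t := by nlinarith
  rcases eq_or_lt_of_le (by omega : (1:Int) ≤ t) with h | h
  · rw [Int.prime_iff_natAbs_prime]
    have : n2 = f := by rw [ht, ← h, mul_one]
    rw [this, hfdef]
    simpa using hf
  · exfalso
    have ht1 : t.natAbs ≠ 1 := by omega
    have hg : t.natAbs.minFac.Prime := Nat.minFac_prime ht1
    have hgd : (t.natAbs.minFac : Int) ∣ t := by
      have h0 : (t.natAbs.minFac : Int) ∣ (t.natAbs : Int) := Int.natCast_dvd_natCast.2 (Nat.minFac_dvd _)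
      rwa [Int.natAbs_of_nonneg (by omega)] at h0
    have hgle : i' ≤ (t.natAbs.minFac : Int) :=
      hmin _ (by exact_mod_cast hg.pos) (Nat.prime_iff_prime_int.mp hg) (hgd.trans ⟨f, by rw [ht]; ring⟩)
    have hglet : (t.natAbs.minFac : Int) ≤ t := Int.le_of_dvd (by omega) hgd
    nlinarith

-- the candidate-folding step B applies per recorded prime power
def candStep (p : Int) : Int → Int × Int → Int := fun x pr => max x (cand p pr.1 pr.2)

-- lockstep invariant of A's outer trial-division loop and B's loop: same leftover, the dict
-- grows by a suffix L of sound items, and B's loop folds candStep over exactly L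
lemma outer_sim {q : Int} :
    ∀ (fuel : Nat) (i n : Int) (d : PySem.Dict Int Int),
      3 ≤ i → i % 2 = 1 → 1 ≤ n → n ∣ q →
      (∀ r : Int, Prime r → i ≤ r → ∀ k : Nat, (r ^ k ∣ q ↔ r ^ k ∣ n)) →
      (∀ r : Int, 0 < r → Prime r → r ∣ n → i ≤ r) →
      n.natAbs < i.toNat + fuel →
      (∀ pr ∈ d.items, ItemSound q pr ∧ pr.1 < i) → d.keys.Nodup →
      ∃ i', i ≤ i' ∧
        (∀ pr ∈ (factorizeOuter fuel i n d).2.items, ItemSound q pr ∧ pr.1 < i') ∧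
        (factorizeOuter fuel i n d).2.keys.Nodup ∧
        1 ≤ (factorizeOuter fuel i n d).1 ∧ (factorizeOuter fuel i n d).1 ∣ q ∧
        (factorizeOuter fuel i n d).1 < i' * i' ∧
        (∀ r : Int, Prime r → i' ≤ r → ∀ k : Nat,
          (r ^ k ∣ q ↔ r ^ k ∣ (factorizeOuter fuel i n d).1)) ∧
        (∀ r : Int, 0 < r → Prime r → r ∣ (factorizeOuter fuel i n d).1 → i' ≤ r) ∧
        ∃ L, (factorizeOuter fuel i n d).2.items = d.items ++ L ∧
          ∀ (P b0 : Int), xyiAltLoop fuel P i n b0 =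
            ((factorizeOuter fuel i n d).1, L.foldl (candStep P) b0) := by
  intro fuel
  induction fuel with
  | zero =>
    intro i n d h3 hodd hn hnq hval hmin hfuel hd hnodup
    have hstep : factorizeOuter 0 i n d = (n, d) := rfl
    rw [hstep]
    refine ⟨i, le_rfl, hd, hnodup, hn, hnq, ?_, hval, hmin, [], by simp, fun P b0 => rfl⟩
    show n < i * i
    have : n < i := by omega
    nlinarith
  | succ fuel ih =>
    intro i n d h3 hodd hn hnq hval hmin hfuel hd hnodup
    by_cases hcond : i * i ≤ n
    · -- loop body runs
      obtain ⟨c, m, hn_eq, hm⟩ := exists_pow_mul_not_dvd i (by omega) n (by omega)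
      have hcf : c < n.natAbs + 1 := pow_le_natAbs (by omega) (by omega) ⟨m, hn_eq⟩
      have hrun : factorizeInner (n.natAbs + 1) i n d = (m, pvBump i c d) := by
        rw [hn_eq] at hcf ⊢
        exact factorizeInner_spec (by omega) hm c _ hcf d
      have hstep : factorizeOuter (fuel + 1) i n d = factorizeOuter fuel (i + 2) m (pvBump i c d) := by
        simp only [factorizeOuter, if_pos hcond, hrun]
      have hvpn : vp (n.natAbs + 1) n i = c := by
        rw [hn_eq] at hcf ⊢
        exact vp_spec (by omega) hm c _ hcf
      -- facts about m
      have hipowpos : (0:Int) < i ^ c := pow_pos (by omega) c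
      have hmpos : 1 ≤ m := by nlinarith
      have hmn : m ∣ n := ⟨i ^ c, by rw [hn_eq]; ring⟩
      have hmq : m ∣ q := hmn.trans hnq
      have hval' : ∀ r : Int, Prime r → i + 2 ≤ r → ∀ k : Nat, (r ^ k ∣ q ↔ r ^ k ∣ m) := by
        intro r hr hri k
        rw [hval r hr (by omega) k, hn_eq]
        have hrpos : 0 < r := by omega
        have hnd : ¬ r ∣ i := fun hdvd => by
          have := Int.le_of_dvd (by omega) hdvd
          omega
        have hcop : IsCoprime (r ^ k) (i ^ c) := ((hr.coprime_iff_not_dvd).2 hnd).pow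
        constructor
        · intro h
          exact hcop.dvd_of_dvd_mul_right (by rwa [mul_comm] at h)
        · intro h
          exact h.trans (dvd_mul_left m (i ^ c))
      have hmin' : ∀ r : Int, 0 < r → Prime r → r ∣ m → i + 2 ≤ r := by
        intro r hrpos hr hrm
        have hri : i ≤ r := hmin r hrpos hr (hrm.trans hmn)
        have hrne : r ≠ i := fun h => hm (h ▸ hrm)
        have hrne1 : r ≠ i + 1 := by
          intro h
          have h2r : (2:Int) ∣ r := by omega
          have hnp : r.natAbs.Prime := Int.prime_iff_natAbs_prime.1 hr
          have h2rn : 2 ∣ r.natAbs := by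
            have : ((2:Nat) : Int) ∣ r := by exact_mod_cast h2r
            omega
          have := (hnp.eq_one_or_self_of_dvd 2 h2rn).resolve_left (by omega)
          omega
        omega
      have hfuel' : m.natAbs < (i + 2).toNat + fuel := by
        have h1 : m.natAbs ≤ n.natAbs := Int.natAbs_le_of_dvd_ne_zero hmn (by omega)
        omega
      rcases Nat.eq_zero_or_pos c with hc0 | hc1
      · -- no factor of i: dict unchanged, m = n, B takes its `else` branch
        subst hc0
        have hbump : pvBump i 0 d = d := rfl
        rw [hbump] at hstep
        have hmn0 : m = n := by rw [hn_eq]; ring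
        obtain ⟨i', hii', hA1, hA2, hA3, hA4, hA5, hA6, hA7, L, hL, hB⟩ :=
          ih (i + 2) m d (by omega) (by omega) hmpos hmq hval' hmin' hfuel'
            (fun pr hpr => ⟨(hd pr hpr).1, by have := (hd pr hpr).2; omega⟩) hnodup
        refine ⟨i', by omega, by rw [hstep]; exact hA1, by rw [hstep]; exact hA2,
          by rw [hstep]; exact hA3, by rw [hstep]; exact hA4, by rw [hstep]; exact hA5,
          by rw [hstep]; exact hA6, by rw [hstep]; exact hA7, L, by rw [hstep, hL], ?_⟩
        intro P b0
        have hBstep : xyiAltLoop (fuel + 1) P i n b0 = xyiAltLoop fuel P (i + 2) m b0 := by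
          simp only [xyiAltLoop, if_pos hcond, hvpn]
          rw [if_neg (by simp), hmn0]
        rw [hBstep, hB, hstep]
      · -- i is a genuine (prime) factor, recorded with exponent c; B records the candidate
        have hidvd : i ∣ n := by
          rw [hn_eq]
          exact Dvd.dvd.mul_right (dvd_pow_self i (by omega)) m
        have hiprime : Prime i := prime_of_min_divisor (by omega) hidvd hmin
        have hcont : d.contains i = false := by
          rcases h : d.contains i with _ | _
          · rfl
          · exfalso
            have hik : i ∈ d.keys := (PySem.Dict.contains_iff_mem_keys d i).1 h
            obtain ⟨pr, hpr, hpri⟩ := List.mem_map.1 hik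
            have := (hd pr hpr).2
            omega
        obtain ⟨hbitems, hbkeys⟩ := pvBump_fresh i c hc1 d hcont hnodup
        have hkmem : i ∉ d.keys := fun hmem => by
          rw [(PySem.Dict.contains_iff_mem_keys d i).2 hmem] at hcont; cases hcont
        have hbnodup : (pvBump i c d).keys.Nodup := by
          rw [hbkeys]
          exact List.Nodup.append hnodup (List.nodup_singleton i) (by simpa using hkmem)
        have hsound_new : ItemSound q (i, (c : Int)) := by
          simp only [ItemSound, Int.toNat_natCast]
          refine ⟨by omega, hiprime, by exact_mod_cast hc1, ?_, ?_⟩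
          · rw [hval i hiprime le_rfl c, hn_eq]
            exact Dvd.dvd.mul_right dvd_rfl m
          · rw [hval i hiprime le_rfl (c + 1), hn_eq]
            intro hdvd
            have : i ^ c * i ∣ i ^ c * m := by
              rw [show i ^ c * i = i ^ (c + 1) by ring]
              exact hdvd
            exact hm ((mul_dvd_mul_iff_left (pow_ne_zero c (by omega : i ≠ 0))).1 this)
        have hd' : ∀ pr ∈ (pvBump i c d).items, ItemSound q pr ∧ pr.1 < i + 2 := by
          intro pr hpr
          rw [hbitems] at hpr
          rcases List.mem_append.1 hpr with h | h
          · exact ⟨(hd pr h).1, by have := (hd pr h).2; omega⟩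
          · simp only [List.mem_singleton] at h
            subst h
            exact ⟨hsound_new, by omega⟩
        obtain ⟨i', hii', hA1, hA2, hA3, hA4, hA5, hA6, hA7, L, hL, hB⟩ :=
          ih (i + 2) m (pvBump i c d) (by omega) (by omega) hmpos hmq hval' hmin' hfuel' hd' hbnodup
        refine ⟨i', by omega, by rw [hstep]; exact hA1, by rw [hstep]; exact hA2,
          by rw [hstep]; exact hA3, by rw [hstep]; exact hA4, by rw [hstep]; exact hA5,
          by rw [hstep]; exact hA6, by rw [hstep]; exact hA7,
          (i, (c : Int)) :: L, by rw [hstep, hL, hbitems]; simp, ?_⟩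
        intro P b0
        have hBstep : xyiAltLoop (fuel + 1) P i n b0 =
            xyiAltLoop fuel P (i + 2) m (max b0 (cand P i ((c : Nat) : Int))) := by
          simp only [xyiAltLoop, if_pos hcond, hvpn]
          rw [if_pos (by omega),
            show PySem.Int.floordiv n (i ^ c) = m from by
              rw [hn_eq]; exact floordiv_mul_cancel _ _ hipowpos]
        rw [hBstep, hB, hstep, List.foldl_cons]
        rfl
    · -- exit: both loops stop with the same n
      have hstep : factorizeOuter (fuel + 1) i n d = (n, d) := by
        simp only [factorizeOuter, if_neg hcond]
      rw [hstep]
      refine ⟨i, le_rfl, hd, hnodup, hn, hnq, by omega, hval, hmin, [], by simp, ?_⟩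
      intro P b0
      simp only [xyiAltLoop, if_neg hcond, List.foldl_nil]

-- factorize is sound, and B's whole computation (on the p % q == 0 branch) is the fold of
-- candStep over factorize's items
lemma factorize_sim {q : Int} (hq : 2 ≤ q ∨ q ≤ -2) :
    (∀ pr ∈ (factorize q).items, ItemSound q pr) ∧
    ∀ P : Int, PySem.Int.mod P q = 0 →
      xyi_alt P q = ((factorize q).items).foldl (candStep P) 1 := by
  have hq0 : q ≠ 0 := by omega
  obtain ⟨c, m, hq_eq, hm2⟩ := exists_pow_mul_not_dvd 2 le_rfl q hq0
  have hcf : c < q.natAbs + 1 := pow_le_natAbs le_rfl hq0 ⟨m, hq_eq⟩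
  have hrun2 : factorizeTwoLoop (q.natAbs + 1) q PySem.Dict.empty = (m, pvBump 2 c PySem.Dict.empty) := by
    rw [hq_eq] at hcf ⊢
    exact factorizeTwoLoop_spec hm2 c _ hcf _
  have hvp2 : vp (q.natAbs + 1) q 2 = c := by
    rw [hq_eq] at hcf ⊢
    exact vp_spec (by norm_num) hm2 c _ hcf
  have hm0 : m ≠ 0 := by rintro rfl; simp at hq_eq; omega
  -- the dict after the 2-loop
  have hd1 : ((pvBump 2 c PySem.Dict.empty).items = if c = 0 then [] else [((2:Int), (c:Int))]) ∧
      (pvBump 2 c PySem.Dict.empty).keys.Nodup := by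
    rcases Nat.eq_zero_or_pos c with hc0 | hc1
    · subst hc0; exact ⟨rfl, List.nodup_nil⟩
    · obtain ⟨h1, h2⟩ := pvBump_fresh 2 c hc1 PySem.Dict.empty (by rfl) List.nodup_nil
      refine ⟨?_, ?_⟩
      · rw [h1, if_neg (by omega)]; rfl
      · rw [h2]; exact List.nodup_singleton _
  have hsound2 : c ≠ 0 → ItemSound q ((2:Int), (c:Int)) := by
    intro hc
    simp only [ItemSound, Int.toNat_natCast]
    refine ⟨le_rfl, Int.prime_two, by exact_mod_cast Nat.pos_iff_ne_zero.2 hc, ⟨m, hq_eq⟩, ?_⟩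
    rintro ⟨t, ht⟩
    apply hm2
    have : (2:Int) ^ c * m = 2 ^ c * (2 * t) := by rw [← hq_eq, ht]; ring
    have := mul_left_cancel₀ (pow_ne_zero c (by norm_num : (2:Int) ≠ 0)) this
    exact ⟨t, this⟩
  have hsound_d1 : ∀ pr ∈ (pvBump 2 c PySem.Dict.empty).items, ItemSound q pr ∧ pr.1 < 3 := by
    intro pr hpr
    rw [hd1.1] at hpr
    rcases Nat.eq_zero_or_pos c with hc0 | hc1
    · rw [if_pos hc0] at hpr; cases hpr
    · rw [if_neg (by omega)] at hpr
      simp only [List.mem_singleton] at hpr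
      subst hpr
      exact ⟨hsound2 (by omega), by norm_num⟩
  have hfq : factorize q =
      (if (factorizeOuter (m.natAbs + 3) 3 m (pvBump 2 c PySem.Dict.empty)).1 > 1 then
        (factorizeOuter (m.natAbs + 3) 3 m (pvBump 2 c PySem.Dict.empty)).2.insert
          (factorizeOuter (m.natAbs + 3) 3 m (pvBump 2 c PySem.Dict.empty)).1 1
      else (factorizeOuter (m.natAbs + 3) 3 m (pvBump 2 c PySem.Dict.empty)).2) := by
    unfold factorize
    rw [hrun2]
  -- B's 2-phase: n0 = m and b0 = fold of candStep over the 2-part items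
  have hn0 : (if vp (q.natAbs + 1) q 2 ≠ 0 then PySem.Int.floordiv q (2 ^ vp (q.natAbs + 1) q 2) else q) = m := by
    rw [hvp2]
    rcases Nat.eq_zero_or_pos c with hc0 | hc1
    · rw [if_neg (by omega)]
      rw [hq_eq, hc0]; ring
    · rw [if_pos (by omega), hq_eq, floordiv_mul_cancel _ _ (pow_pos (by norm_num) c)]
  have hb0 : ∀ P : Int,
      (if vp (q.natAbs + 1) q 2 ≠ 0 then max 1 (cand P 2 ((vp (q.natAbs + 1) q 2 : Nat) : Int)) else 1) =
      ((pvBump 2 c PySem.Dict.empty).items).foldl (candStep P) 1 := by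
    intro P
    rw [hvp2, hd1.1]
    rcases Nat.eq_zero_or_pos c with hc0 | hc1
    · rw [if_neg (by omega), if_pos hc0, List.foldl_nil]
    · rw [if_pos (by omega), if_neg (by omega), List.foldl_cons, List.foldl_nil]
      rfl
  have hBbody : ∀ P : Int, PySem.Int.mod P q = 0 →
      xyi_alt P q =
        (if (xyiAltLoop (m.natAbs + 3) P 3 m (((pvBump 2 c PySem.Dict.empty).items).foldl (candStep P) 1)).1 > 1 then
          max (xyiAltLoop (m.natAbs + 3) P 3 m (((pvBump 2 c PySem.Dict.empty).items).foldl (candStep P) 1)).2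
            (cand P (xyiAltLoop (m.natAbs + 3) P 3 m (((pvBump 2 c PySem.Dict.empty).items).foldl (candStep P) 1)).1 1)
        else (xyiAltLoop (m.natAbs + 3) P 3 m (((pvBump 2 c PySem.Dict.empty).items).foldl (candStep P) 1)).2) := by
    intro P hmod
    unfold xyi_alt
    rw [if_neg (by simp [hmod])]
    simp only
    rw [hb0 P, hn0]
  rcases hq with hqpos | hqneg
  · -- q ≥ 2 : run the lockstep invariant
    have hc2pos : (0:Int) < 2 ^ c := pow_pos (by norm_num) c
    have hmpos : 1 ≤ m := by nlinarith
    have hmq : m ∣ q := ⟨2 ^ c, by rw [hq_eq]; ring⟩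
    have hval : ∀ r : Int, Prime r → (3:Int) ≤ r → ∀ k : Nat, (r ^ k ∣ q ↔ r ^ k ∣ m) := by
      intro r hr hr3 k
      have hnd : ¬ r ∣ 2 := fun hdvd => by
        have := Int.le_of_dvd (by norm_num) hdvd
        omega
      have hcop : IsCoprime (r ^ k) ((2:Int) ^ c) := ((hr.coprime_iff_not_dvd).2 hnd).pow
      rw [hq_eq]
      constructor
      · intro h
        exact hcop.dvd_of_dvd_mul_right (by rwa [mul_comm] at h)
      · intro h
        exact h.trans (dvd_mul_left m (2 ^ c))
    have hmin : ∀ r : Int, 0 < r → Prime r → r ∣ m → (3:Int) ≤ r := by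
      intro r hrpos hr hrm
      have hnp : r.natAbs.Prime := Int.prime_iff_natAbs_prime.1 hr
      have h2 : 2 ≤ r := by
        have := hnp.two_le
        omega
      have hne : r ≠ 2 := fun h => hm2 (h ▸ hrm)
      omega
    obtain ⟨i', hi3, hitems, hnodup2, hn2pos, hn2q, hn2lt, hval2, hmin2, L, hLitems, hBloop⟩ :=
      outer_sim (m.natAbs + 3) 3 m (pvBump 2 c PySem.Dict.empty)
        le_rfl (by norm_num) hmpos hmq hval hmin (by omega) hsound_d1 hd1.2
    set O := factorizeOuter (m.natAbs + 3) 3 m (pvBump 2 c PySem.Dict.empty) with hO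
    constructor
    · -- soundness of all items
      rw [hfq]
      by_cases hn2 : O.1 > 1
      · rw [if_pos hn2]
        have hprime : Prime O.1 := prime_of_small hn2 hn2lt (by omega) hmin2
        have hn2ge : i' ≤ O.1 := hmin2 O.1 (by omega) hprime dvd_rfl
        have hcont : O.2.contains O.1 = false := by
          rcases h : O.2.contains O.1 with _ | _
          · rfl
          · exfalso
            obtain ⟨pr, hpr, hpri⟩ := List.mem_map.1 ((PySem.Dict.contains_iff_mem_keys O.2 O.1).1 h)
            have := (hitems pr hpr).2
            omega
        rw [PySem.Dict.items_insert_of_not_contains O.2 _ hcont]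
        intro pr hpr
        rcases List.mem_append.1 hpr with h | h
        · exact (hitems pr h).1
        · simp only [List.mem_singleton] at h
          subst h
          simp only [ItemSound]
          refine ⟨by omega, hprime, le_rfl, by simpa using hn2q, ?_⟩
          intro hdvd
          have h1 : O.1 ^ 2 ∣ O.1 := (hval2 O.1 hprime hn2ge 2).1 (by simpa using hdvd)
          have h2 : O.1 * O.1 ∣ O.1 * 1 := by
            rw [mul_one]
            rw [show O.1 * O.1 = O.1 ^ 2 by ring]
            exact h1
          have := (mul_dvd_mul_iff_left (by omega : O.1 ≠ 0)).1 h2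
          have := Int.le_of_dvd (by norm_num) this
          omega
      · rw [if_neg hn2]
        exact fun pr hpr => (hitems pr hpr).1
    · -- B's whole computation equals the fold over factorize's items
      intro P hmod
      rw [hBbody P hmod, hBloop P _]
      rw [hfq]
      by_cases hn2 : O.1 > 1
      · rw [if_pos hn2, if_pos hn2]
        have hprime : Prime O.1 := prime_of_small hn2 hn2lt (by omega) hmin2
        have hn2ge : i' ≤ O.1 := hmin2 O.1 (by omega) hprime dvd_rfl
        have hcont : O.2.contains O.1 = false := by
          rcases h : O.2.contains O.1 with _ | _
          · rfl
          · exfalso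
            obtain ⟨pr, hpr, hpri⟩ := List.mem_map.1 ((PySem.Dict.contains_iff_mem_keys O.2 O.1).1 h)
            have := (hitems pr hpr).2
            omega
        rw [PySem.Dict.items_insert_of_not_contains O.2 _ hcont, hLitems]
        rw [List.foldl_append, List.foldl_append, List.foldl_cons, List.foldl_nil]
        rfl
      · rw [if_neg hn2, if_neg hn2, hLitems, List.foldl_append]
  · -- q ≤ -2 : m < 0, both loops exit immediately and the leftover branch is skipped
    have hc2pos : (0:Int) < 2 ^ c := pow_pos (by norm_num) c
    have hmneg : m < 0 := by by_contra h; push Not at h; nlinarith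
    have houter : factorizeOuter (m.natAbs + 3) 3 m (pvBump 2 c PySem.Dict.empty) =
        (m, pvBump 2 c PySem.Dict.empty) := by
      have h1 : m.natAbs + 3 = (m.natAbs + 2) + 1 := rfl
      rw [h1]
      simp only [factorizeOuter]
      rw [if_neg (by omega)]
    have hBexit : ∀ P b0 : Int, xyiAltLoop (m.natAbs + 3) P 3 m b0 = (m, b0) := by
      intro P b0
      have h1 : m.natAbs + 3 = (m.natAbs + 2) + 1 := rfl
      rw [h1]
      simp only [xyiAltLoop]
      rw [if_neg (by omega)]
    constructor
    · rw [hfq, houter]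
      rw [if_neg (by omega)]
      exact fun pr hpr => (hsound_d1 pr hpr).1
    · intro P hmod
      rw [hBbody P hmod, hBexit]
      rw [hfq, houter]
      simp only
      rw [if_neg (by omega), if_neg (by omega)]

-- one item of factorize q: A's per-prime step equals folding B's candidate
lemma step_eq {p q : Int} (hp : p ≠ 0) (hqp : q ∣ p) {pr : Int × Int}
    (hs : ItemSound q pr) (x : Int) :
    (if PySem.Int.mod (xyiTempLoop (p.natAbs + 1) q pr.1 p) q ≠ 0 then
      max x (xyiTempLoop (p.natAbs + 1) q pr.1 p) else x) =
    candStep p x pr := by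
  obtain ⟨hπ2, hπ, hb1, hbd, hbd'⟩ := hs
  have hbtn : pr.2.toNat = (pr.2 - 1).toNat + 1 := by omega
  rw [hbtn] at hbd hbd'
  obtain ⟨a, m, hp_eq, hm⟩ := exists_pow_mul_not_dvd pr.1 hπ2 p hp
  have hchar : ∀ c : Nat, (q ∣ pr.1 ^ c * m ↔ (pr.2 - 1).toNat + 1 ≤ c) :=
    dvd_char hπ hm hbd hbd' (hp_eq ▸ hqp)
  have hba : (pr.2 - 1).toNat + 1 ≤ a := (hchar a).1 (hp_eq ▸ hqp)
  have hfa : a < p.natAbs + 1 := pow_le_natAbs hπ2 hp ⟨m, hp_eq⟩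
  have hT : xyiTempLoop (p.natAbs + 1) q pr.1 p = pr.1 ^ (pr.2 - 1).toNat * m := by
    have h1 := xyiTempLoop_spec hchar (by omega : (0:Int) < pr.1)
      (a - (pr.2 - 1).toNat) (p.natAbs + 1) (by omega)
    rwa [show (pr.2 - 1).toNat + (a - (pr.2 - 1).toNat) = a from by omega, ← hp_eq] at h1
  have hC : cand p pr.1 pr.2 = pr.1 ^ (pr.2 - 1).toNat * m :=
    cand_eq hπ2 hp_eq hm hp hb1 (by omega)
  have hguard : PySem.Int.mod (pr.1 ^ (pr.2 - 1).toNat * m) q ≠ 0 := by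
    rw [Ne, PySem.Int.mod_eq_zero_iff_dvd, hchar]
    omega
  rw [hT, if_pos hguard]
  unfold candStep
  rw [hC]

-- ===== VERDICT (by name: the statement is the Claim_ definition above) =====
theorem xyi_spec : Claim_equal_xyi := by
  intro p q _ hpre
  obtain ⟨hq0, hpor⟩ := hpre
  unfold Spec_xyi
  by_cases hmod : PySem.Int.mod p q = 0
  · by_cases hq1 : q = 1
    · subst hq1; rfl
    · by_cases hqm1 : q = -1
      · subst hqm1; rfl
      · have hp0 : p ≠ 0 := by
          rcases hpor with h | h | h
          · exact h
          · exact absurd h hq1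
          · exact absurd h hqm1
        have hqp : q ∣ p := (PySem.Int.mod_eq_zero_iff_dvd p q).1 hmod
        obtain ⟨hfs, hB⟩ := factorize_sim (q := q) (by omega)
        rw [hB p hmod]
        unfold xyi
        rw [if_neg (by simp [hmod])]
        have hkeys : (factorize q).keys = (factorize q).items.map Prod.fst := rfl
        rw [hkeys, List.foldl_map]
        apply PySem.List.foldl_congr_mem
        intro acc pr hpr
        exact step_eq hp0 hqp (hfs pr hpr) acc
  · unfold xyi xyi_alt
    rw [if_pos hmod, if_pos hmod]
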